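-- pv_equiv track=rewrite | github.com/ayoubzulfiqar/Leetcode-Medium | MaximumScoreFromRemovingSubstrings/maximum_score_from_removing_substrings.py | _remove_and_score
-- ===== SOURCE A (Python) =====
-- def _remove_and_score(s_orig, char1, char2, points):
--     score = 0
--     stack = []
--     for char in s_orig:
--         if stack and char == char2 and stack[-1] == char1:
--             stack.pop()
--             score += points
--         else:
--             stack.append(char)
--
--     remaining_s = "".join(stack)
--     return score, remaining_s
-- ===== SOURCE B (Python) =====
-- def _remove_and_score(s_orig, char1, char2, points):
--     score = 0
--     count1 = 0  # run length of pending (still removable) char1's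
--     out = []    # committed characters: can never be removed anymore
--     for ch in s_orig:
--         if ch == char2 and count1 > 0:
--             count1 -= 1
--             score += points
--         elif ch == char1:
--             count1 += 1
--         else:
--             out.append(char1 * count1 + ch)
--             count1 = 0
--     out.append(char1 * count1)
--     return score, "".join(out)
-- ===== Notes on version B (the rewrite author's own statement) =====
-- stated objective: alternative
-- what changed: Replaces the explicit character stack with a run-length counter of pending unmatched char1's plus a list of committed text that can never be removed again, flushing the counter whenever a non-matching character arrives; the char2-match branch is checked before the char1 branch so char1==char2 behaves identically.
import Mathlib
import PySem

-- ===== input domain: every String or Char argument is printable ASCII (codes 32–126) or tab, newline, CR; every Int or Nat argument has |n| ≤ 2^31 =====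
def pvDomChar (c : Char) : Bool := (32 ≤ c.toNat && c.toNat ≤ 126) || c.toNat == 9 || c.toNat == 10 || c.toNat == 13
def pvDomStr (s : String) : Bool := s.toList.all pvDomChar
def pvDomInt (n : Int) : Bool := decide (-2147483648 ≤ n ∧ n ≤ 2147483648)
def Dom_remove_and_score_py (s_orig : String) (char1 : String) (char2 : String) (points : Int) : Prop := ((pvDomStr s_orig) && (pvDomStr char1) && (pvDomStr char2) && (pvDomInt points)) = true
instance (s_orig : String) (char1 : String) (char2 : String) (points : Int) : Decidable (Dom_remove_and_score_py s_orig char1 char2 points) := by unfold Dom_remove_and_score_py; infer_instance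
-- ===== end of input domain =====

-- B replaces A's explicit character stack by a run-length counter of pending char1's plus a
-- list of committed text (objective: alternative decomposition, same cost).

-- ===== PORT A =====
-- A's loop body: (score, stack with top at head); a Python character is a 1-char string,
-- compared to the String parameters, hence the String.ofList [·] comparisons.
def pvStepA (char1 char2 : String) (points : Int) (acc : Int × List Char) (c : Char) : Int × List Char :=
  match acc with
  | (score, top :: rest) =>
      if String.ofList [c] = char2 ∧ String.ofList [top] = char1 then (score + points, rest)
      else (score, c :: top :: rest)
  | (score, []) => (score, [c])

def remove_and_score_py (s_orig : String) (char1 : String) (char2 : String) (points : Int) : Int × String :=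
  let r := s_orig.toList.foldl (pvStepA char1 char2 points) ((0 : Int), ([] : List Char))
  (r.1, String.ofList r.2.reverse)

-- ===== PORT B =====
-- 'char1 * count1' in Source B is ported as pvRep count1 char1.toList.
def pvRep : Nat → List Char → List Char
  | 0, _ => []
  | n + 1, w => w ++ pvRep n w

-- Source B's loop, as structural recursion over the remaining characters carrying
-- (score, count1, out); the final flush of count1 happens at the [] case.
def pvGoB (char1 char2 : String) (points : Int) : List Char → Int → Nat → List Char → Int × String
  | [], score, count1, out => (score, String.ofList (out ++ pvRep count1 char1.toList))
  | c :: rest, score, count1, out =>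
      if [c] = char2.toList ∧ 0 < count1 then
        pvGoB char1 char2 points rest (score + points) (count1 - 1) out
      else if [c] = char1.toList then
        pvGoB char1 char2 points rest score (count1 + 1) out
      else
        pvGoB char1 char2 points rest score 0 (out ++ (pvRep count1 char1.toList ++ [c]))

def remove_and_score_py_alt (s_orig : String) (char1 : String) (char2 : String) (points : Int) : Int × String :=
  pvGoB char1 char2 points s_orig.toList 0 0 []

-- ===== PRECONDITION & SPEC =====
def Spec_remove_and_score_py (s_orig : String) (char1 : String) (char2 : String) (points : Int) (out : Int × String) : Prop := out = remove_and_score_py_alt s_orig char1 char2 points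
instance (s_orig : String) (char1 : String) (char2 : String) (points : Int) (out : Int × String) : Decidable (Spec_remove_and_score_py s_orig char1 char2 points out) := by unfold Spec_remove_and_score_py; infer_instance

-- ===== CLAIM (what is proved, stated in full; the proofs are below) =====
def Claim_equal_remove_and_score_py : Prop := ∀ (s_orig : String) (char1 : String) (char2 : String) (points : Int), Dom_remove_and_score_py s_orig char1 char2 points → Spec_remove_and_score_py s_orig char1 char2 points (remove_and_score_py s_orig char1 char2 points)

-- ===== LEMMAS AND PROOFS =====

theorem ofList_eq_iff (l : List Char) (s : String) : String.ofList l = s ↔ l = s.toList := by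
  constructor
  · intro h; rw [← h]; simp
  · intro h; rw [h]; simp

-- A's step is a plain push whenever the pop condition fails at the top of the stack.
theorem stepA_push (char1 char2 : String) (points sc : Int) (st : List Char) (c : Char)
    (h : ∀ top rest, st = top :: rest → ¬(String.ofList [c] = char2 ∧ String.ofList [top] = char1)) :
    pvStepA char1 char2 points (sc, st) c = (sc, c :: st) := by
  cases st with
  | nil => simp [pvStepA]
  | cons top rest => simp [pvStepA, h top rest rfl]

theorem lastRev_ne (res : List Char) (c1 : Char)
    (hres : ∀ c, res.getLast? = some c → c ≠ c1) :
    ∀ top rest, res.reverse = top :: rest → top ≠ c1 := by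
  intro top rest hr
  apply hres
  rw [← List.head?_reverse, hr]
  rfl

theorem pvRep_single (c1 : Char) : ∀ k, pvRep k [c1] = List.replicate k c1 := by
  intro k
  induction k with
  | zero => rfl
  | succ n ihn => simp [pvRep, ihn, List.replicate_succ]

-- Case char1 is a single character c1: A's stack is always (replicate k c1 ++ res.reverse)
-- where (k, res) is B's state and res never ends in c1.
theorem pvLoop_singleton (char1 char2 : String) (points : Int) (c1 : Char)
    (h1 : char1.toList = [c1]) :
    ∀ (l : List Char) (sc : Int) (k : Nat) (res : List Char),
      (∀ c, res.getLast? = some c → c ≠ c1) →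
      (let r := l.foldl (pvStepA char1 char2 points) (sc, List.replicate k c1 ++ res.reverse);
       (r.1, String.ofList r.2.reverse))
        = pvGoB char1 char2 points l sc k res := by
  intro l
  induction l with
  | nil =>
    intro sc k res _
    simp [pvGoB, pvRep_single c1, h1, List.reverse_append]
  | cons c t ih =>
    intro sc k res hres
    have hc1 : ∀ x : Char, (String.ofList [x] = char1) ↔ x = c1 := by
      intro x
      rw [ofList_eq_iff, h1]
      simp
    have hc1' : ([c] = char1.toList) ↔ c = c1 := by rw [h1]; simp
    simp only [List.foldl_cons]
    by_cases hc2 : String.ofList [c] = char2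
    · have hc2' : [c] = char2.toList := (ofList_eq_iff _ _).mp hc2
      cases k with
      | succ k' =>
        -- pop / decrement branch
        have hA : pvStepA char1 char2 points (sc, List.replicate (k' + 1) c1 ++ res.reverse) c
            = (sc + points, List.replicate k' c1 ++ res.reverse) := by
          simp [pvStepA, List.replicate_succ, hc2, (hc1 c1).mpr rfl]
        have hB : pvGoB char1 char2 points (c :: t) sc (k' + 1) res
            = pvGoB char1 char2 points t (sc + points) k' res := by
          simp [pvGoB, hc2']
        rw [hA, hB]
        exact ih (sc + points) k' res hres
      | zero =>
        by_cases hcc : c = c1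
        · -- a char equal to both char1 and char2 with nothing pending: B increments the counter
          have hA : pvStepA char1 char2 points (sc, List.replicate 0 c1 ++ res.reverse) c
              = (sc, List.replicate 1 c1 ++ res.reverse) := by
            simp only [List.replicate_zero, List.nil_append]
            rw [stepA_push char1 char2 points sc res.reverse c]
            · simp [hcc]
            · intro top rest hr hand
              exact lastRev_ne res c1 hres top rest hr ((hc1 top).mp hand.2)
          have hB : pvGoB char1 char2 points (c :: t) sc 0 res
              = pvGoB char1 char2 points t sc 1 res := by
            simp [pvGoB, hc1'.mpr hcc]
          rw [hA, hB]
          exact ih sc 1 res hres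
        · -- commit c (nothing pending)
          have hA : pvStepA char1 char2 points (sc, List.replicate 0 c1 ++ res.reverse) c
              = (sc, List.replicate 0 c1 ++ (res ++ ([] ++ [c])).reverse) := by
            simp only [List.replicate_zero, List.nil_append]
            rw [stepA_push char1 char2 points sc res.reverse c]
            · simp [List.reverse_append]
            · intro top rest hr hand
              exact lastRev_ne res c1 hres top rest hr ((hc1 top).mp hand.2)
          have hB : pvGoB char1 char2 points (c :: t) sc 0 res
              = pvGoB char1 char2 points t sc 0 (res ++ (pvRep 0 char1.toList ++ [c])) := by
            simp only [pvGoB]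
            rw [if_neg (by simp), if_neg (fun h => hcc (hc1'.mp h))]
          rw [hA, hB]
          have : pvRep 0 char1.toList = ([] : List Char) := rfl
          rw [this]
          refine ih sc 0 (res ++ ([] ++ [c])) ?_
          intro x hx
          simp only [List.nil_append] at hx
          rw [List.getLast?_concat] at hx
          intro hxc1
          exact hcc ((Option.some_inj.mp hx).trans hxc1)
    · have hc2' : ¬ ([c] = char2.toList) := fun h => hc2 ((ofList_eq_iff _ _).mpr h)
      by_cases hcc : c = c1
      · -- push another pending char1
        have hA : pvStepA char1 char2 points (sc, List.replicate k c1 ++ res.reverse) c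
            = (sc, List.replicate (k + 1) c1 ++ res.reverse) := by
          rw [stepA_push char1 char2 points sc _ c]
          · simp [hcc, List.replicate_succ]
          · intro top rest _ hand; exact hc2 hand.1
        have hB : pvGoB char1 char2 points (c :: t) sc k res
            = pvGoB char1 char2 points t sc (k + 1) res := by
          simp only [pvGoB]
          rw [if_neg (fun h => hc2' h.1), if_pos (hc1'.mpr hcc)]
        rw [hA, hB]
        exact ih sc (k + 1) res hres
      · -- commit: flush the k pending char1's and c
        have hA : pvStepA char1 char2 points (sc, List.replicate k c1 ++ res.reverse) c
            = (sc, List.replicate 0 c1 ++ (res ++ (pvRep k char1.toList ++ [c])).reverse) := by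
          rw [stepA_push char1 char2 points sc _ c]
          · simp [pvRep_single c1, h1, List.reverse_append]
          · intro top rest _ hand; exact hc2 hand.1
        have hB : pvGoB char1 char2 points (c :: t) sc k res
            = pvGoB char1 char2 points t sc 0 (res ++ (pvRep k char1.toList ++ [c])) := by
          simp only [pvGoB]
          rw [if_neg (fun h => hc2' h.1), if_neg (fun h => hcc (hc1'.mp h))]
        rw [hA, hB]
        refine ih sc 0 (res ++ (pvRep k char1.toList ++ [c])) ?_
        intro x hx
        rw [← List.append_assoc, List.getLast?_concat] at hx
        intro hxc1
        exact hcc ((Option.some_inj.mp hx).trans hxc1)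

-- Case char1 is not a single character: A never pops, B's counter stays 0; both copy the input.
theorem pvLoopA_nopop (char1 char2 : String) (points : Int)
    (h1 : ∀ c : Char, char1.toList ≠ [c]) :
    ∀ (l : List Char) (sc : Int) (st : List Char),
      l.foldl (pvStepA char1 char2 points) (sc, st) = (sc, l.reverse ++ st) := by
  intro l
  induction l with
  | nil => simp
  | cons c t ih =>
    intro sc st
    have hpush : pvStepA char1 char2 points (sc, st) c = (sc, c :: st) := by
      refine stepA_push char1 char2 points sc st c ?_
      intro top rest _ hand
      exact h1 top (((ofList_eq_iff [top] char1).mp hand.2).symm)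
    simp [hpush, ih]

theorem pvGoB_nopend (char1 char2 : String) (points : Int)
    (h1 : ∀ c : Char, char1.toList ≠ [c]) :
    ∀ (l : List Char) (sc : Int) (res : List Char),
      pvGoB char1 char2 points l sc 0 res = (sc, String.ofList (res ++ l)) := by
  intro l
  induction l with
  | nil => intro sc res; simp [pvGoB, pvRep]
  | cons c t ih =>
    intro sc res
    have hne : ¬ ([c] = char1.toList) := fun h => h1 c h.symm
    simp only [pvGoB]
    rw [if_neg (by simp), if_neg hne, ih]
    simp [pvRep]

-- ===== VERDICT (by name: the statement is the Claim_ definition above) =====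
theorem remove_and_score_py_spec : Claim_equal_remove_and_score_py := by
  intro s_orig char1 char2 points _
  unfold Spec_remove_and_score_py remove_and_score_py remove_and_score_py_alt
  by_cases h1 : ∃ c1, char1.toList = [c1]
  · obtain ⟨c1, hc1⟩ := h1
    have := pvLoop_singleton char1 char2 points c1 hc1 s_orig.toList 0 0 [] (by simp)
    simpa using this
  · have h1' : ∀ c : Char, char1.toList ≠ [c] := by
      intro c h
      exact h1 ⟨c, h⟩
    rw [pvLoopA_nopop char1 char2 points h1' s_orig.toList 0 [],
        pvGoB_nopend char1 char2 points h1' s_orig.toList 0 []]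
    simp
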